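-- pv_equiv track=rewrite | github.com/AuguestGao/data-structures-and-algorithms | Coding Patterns/4 merge intervals/4 (2) find conflicting appointments (medium).py | solution
-- ===== SOURCE A (Python) =====
-- def solution(appointments):
-- 	appointments.sort(key=lambda x: x[0])
-- 	start, end = 0, 1
-- 	conflicts = []
--
-- 	cur = 0
-- 	nxt = 1
--
-- 	while nxt < len(appointments):
--
-- 		while nxt < len(appointments) and appointments[nxt][start] < appointments[cur][end]:
-- 			conflicts.append([appointments[cur], appointments[nxt]])
-- 			nxt += 1
--
-- 		cur += 1
-- 		nxt = cur + 1
--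
-- 	return conflicts
-- ===== SOURCE B (Python) =====
-- # Same return value as A; like A, sorts the input list in place (same observable mutation).
-- def solution(appointments):
--     appointments.sort(key=lambda x: x[0])
--     starts = [a[0] for a in appointments]
--     n = len(appointments)
--     conflicts = []
--     for i in range(n):
--         end_i = appointments[i][1]
--         lo, hi = 0, n
--         while lo < hi:
--             mid = (lo + hi) // 2
--             if starts[mid] < end_i:
--                 lo = mid + 1
--             else:
--                 hi = mid
--         for j in range(i + 1, lo):
--             conflicts.append([appointments[i], appointments[j]])
--     return conflicts
-- ===== Notes on version B (the rewrite author's own statement) =====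
-- stated objective: alternative
-- what changed: Replaces A's nested linear forward scan with a prebuilt list of start times and a hand-written bisect_left binary search that finds each appointment's conflict cutoff, emitting the same pairs in the same order via an indexed range.
-- outside the precondition, e.g. on solution([[5], [0, 9]]): A returns [[[0, 9], [5]]], B raises IndexError
import Mathlib
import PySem

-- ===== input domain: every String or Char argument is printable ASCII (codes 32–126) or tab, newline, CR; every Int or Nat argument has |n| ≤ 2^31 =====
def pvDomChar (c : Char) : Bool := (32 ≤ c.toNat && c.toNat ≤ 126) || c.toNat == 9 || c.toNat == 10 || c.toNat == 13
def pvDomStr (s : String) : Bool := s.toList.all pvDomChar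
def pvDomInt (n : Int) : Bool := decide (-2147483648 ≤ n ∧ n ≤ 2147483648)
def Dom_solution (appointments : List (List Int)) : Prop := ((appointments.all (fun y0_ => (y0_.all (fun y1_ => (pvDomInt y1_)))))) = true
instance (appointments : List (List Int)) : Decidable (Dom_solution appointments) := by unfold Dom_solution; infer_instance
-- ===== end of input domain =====

-- B replaces A's linear forward scan per appointment with a prebuilt start-index and a binary
-- search (alternative decomposition). Like A, B sorts the argument list in place; the
-- equivalence proved here is about the return value (the mutation is identical anyway).

-- ===== PORT A =====
-- sort key: lambda x: x[0]  (total via default; Pre_ guarantees every sublist is long enough)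
def pvKey (x : List Int) : Int := PySem.List.pyGetD x 0 0

-- inner while: nxt < len(appointments) and appointments[nxt][0] < appointments[cur][1];
-- fuel = ys.length - nxt makes the recursion structural (it never runs out: fuel 0 means
-- nxt ≥ len, where the loop condition is false anyway)
def pvA_innerGo (ys : List (List Int)) (cur : Nat) :
    Nat → Nat → List (List (List Int)) → List (List (List Int))
  | fuel + 1, nxt, acc =>
    if nxt < ys.length ∧
        PySem.List.pyGetD (PySem.List.pyGetD ys (nxt : Int) []) 0 0 <
          PySem.List.pyGetD (PySem.List.pyGetD ys (cur : Int) []) 1 0 then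
      pvA_innerGo ys cur fuel (nxt + 1)
        (acc ++ [[PySem.List.pyGetD ys (cur : Int) [], PySem.List.pyGetD ys (nxt : Int) []]])
    else acc
  | 0, _, acc => acc

def pvA_inner (ys : List (List Int)) (cur nxt : Nat)
    (acc : List (List (List Int))) : List (List (List Int)) :=
  pvA_innerGo ys cur (ys.length - nxt) nxt acc

-- outer while; Python discards the inner loop's final nxt and resets it to cur + 1, so at
-- every outer-loop head nxt = cur + 1; fuel = ys.length - cur, again never exhausted
def pvA_outerGo (ys : List (List Int)) :
    Nat → Nat → List (List (List Int)) → List (List (List Int))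
  | fuel + 1, cur, acc =>
    if cur + 1 < ys.length then
      pvA_outerGo ys fuel (cur + 1) (pvA_inner ys cur (cur + 1) acc)
    else acc
  | 0, _, acc => acc

def solution (appointments : List (List Int)) : List (List (List Int)) :=
  let ys := PySem.List.sorted appointments pvKey false
  pvA_outerGo ys ys.length 0 []

-- ===== PORT B =====
-- hand-written bisect_left of Source B; (lo + hi) // 2 on nonnegative ints is Nat division;
-- fuel = hi - lo makes the recursion structural (it never runs out: each step shrinks hi - lo)
def pvB_bisectGo (starts : List Int) (x : Int) : Nat → Nat → Nat → Nat
  | fuel + 1, lo, hi =>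
    if lo < hi then
      let mid := (lo + hi) / 2
      if PySem.List.pyGetD starts (mid : Int) 0 < x then pvB_bisectGo starts x fuel (mid + 1) hi
      else pvB_bisectGo starts x fuel lo mid
    else lo
  | 0, lo, _ => lo

def pvB_bisect (starts : List Int) (x : Int) (lo hi : Nat) : Nat :=
  pvB_bisectGo starts x (hi - lo) lo hi

def solution_alt (appointments : List (List Int)) : List (List (List Int)) :=
  let ys := PySem.List.sorted appointments pvKey false
  let starts := ys.map pvKey               -- [a[0] for a in appointments]
  let n := ys.length
  (List.range n).foldl (fun conflicts (i : Nat) =>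
    let endi := PySem.List.pyGetD (PySem.List.pyGetD ys (i : Int) []) 1 0
    let cut := pvB_bisect starts endi 0 n
    conflicts ++ (List.range' (i + 1) (cut - (i + 1))).map
      (fun (j : Nat) => [PySem.List.pyGetD ys (i : Int) [], PySem.List.pyGetD ys (j : Int) []])) []

-- ===== PRECONDITION & SPEC =====
-- Pre_ excludes lists containing an appointment of fewer than 2 entries: Python A raises
-- IndexError on nearly all of them (and B, which reads every appointment's end, raises uniformly).
def Pre_solution (appointments : List (List Int)) : Prop :=
  ∀ a ∈ appointments, 2 ≤ a.length
instance (appointments : List (List Int)) : Decidable (Pre_solution appointments) := by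
  unfold Pre_solution; infer_instance

def pvWitness_solution : List (List Int) := [[0, 3], [1, 2], [4, 5]]

def Spec_solution (appointments : List (List Int)) (out : List (List (List Int))) : Prop :=
  out = solution_alt appointments
instance (appointments : List (List Int)) (out : List (List (List Int))) :
    Decidable (Spec_solution appointments out) := by unfold Spec_solution; infer_instance

-- ===== CLAIM (what is proved, stated in full; the proofs are below) =====
def Claim_equal_solution : Prop := ∀ (appointments : List (List Int)),
  Dom_solution appointments → Pre_solution appointments →
  Spec_solution appointments (solution appointments)

-- ===== LEMMAS AND PROOFS =====

-- the conflict list B emits for appointment i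
def pvG (ys : List (List Int)) (i : Nat) : List (List (List Int)) :=
  (List.range' (i + 1)
      (pvB_bisect (ys.map pvKey)
        (PySem.List.pyGetD (PySem.List.pyGetD ys (i : Int) []) 1 0) 0 ys.length - (i + 1))).map
    (fun (j : Nat) => [PySem.List.pyGetD ys (i : Int) [], PySem.List.pyGetD ys (j : Int) []])

theorem pvB_bisectGo_eq (starts : List Int) (x : Int) (fuel lo hi : Nat) :
    pvB_bisectGo starts x (fuel + 1) lo hi = if lo < hi then
      (if starts.getD ((lo + hi) / 2) 0 < x then pvB_bisectGo starts x fuel ((lo + hi) / 2 + 1) hi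
       else pvB_bisectGo starts x fuel lo ((lo + hi) / 2)) else lo := by
  rw [pvB_bisectGo]; simp only [PySem.List.pyGetD_natCast]

theorem pv_getD_mono (starts : List Int) (hm : starts.Pairwise (· ≤ ·))
    (p q : Nat) (hpq : p ≤ q) (hq : q < starts.length) :
    starts.getD p 0 ≤ starts.getD q 0 := by
  rcases Nat.lt_or_ge p q with h | h
  · have := List.pairwise_iff_getElem.mp hm p q (by omega) hq h
    simpa [List.getD_eq_getElem?_getD, List.getElem?_eq_getElem, hq,
      Nat.lt_of_lt_of_le h (le_of_lt hq)] using this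
  · have : p = q := by omega
    simp [this]

theorem pvB_bisectGo_inv (starts : List Int) (x : Int)
    (hm : starts.Pairwise (· ≤ ·)) :
    ∀ fuel lo hi, hi - lo ≤ fuel → lo ≤ hi → hi ≤ starts.length →
    (∀ k, k < lo → starts.getD k 0 < x) →
    (∀ k, hi ≤ k → k < starts.length → x ≤ starts.getD k 0) →
    pvB_bisectGo starts x fuel lo hi ≤ starts.length ∧
      (∀ k, k < pvB_bisectGo starts x fuel lo hi → starts.getD k 0 < x) ∧
      (∀ k, pvB_bisectGo starts x fuel lo hi ≤ k → k < starts.length →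
        x ≤ starts.getD k 0) := by
  intro fuel
  induction fuel with
  | zero =>
    intro lo hi h0 hle hhi hlow hhigh
    simp only [pvB_bisectGo]
    exact ⟨by omega, hlow, fun k hk1 hk2 => hhigh k (by omega) hk2⟩
  | succ fuel ih =>
    intro lo hi h0 hle hhi hlow hhigh
    rw [pvB_bisectGo_eq]
    by_cases hlt : lo < hi
    · rw [if_pos hlt]
      by_cases hc : starts.getD ((lo + hi) / 2) 0 < x
      · rw [if_pos hc]
        refine ih ((lo + hi) / 2 + 1) hi (by omega) (by omega) hhi ?_ hhigh
        intro k hk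
        exact lt_of_le_of_lt (pv_getD_mono starts hm k ((lo + hi) / 2) (by omega) (by omega)) hc
      · rw [if_neg hc]
        refine ih lo ((lo + hi) / 2) (by omega) (by omega) (by omega) hlow ?_
        intro k hk1 hk2
        exact le_trans (not_lt.mp hc) (pv_getD_mono starts hm ((lo + hi) / 2) k hk1 hk2)
    · rw [if_neg hlt]
      exact ⟨by omega, hlow, fun k hk1 hk2 => hhigh k (by omega) hk2⟩

theorem pvB_bisect_spec (starts : List Int) (x : Int)
    (hm : starts.Pairwise (· ≤ ·)) :
    pvB_bisect starts x 0 starts.length ≤ starts.length ∧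
      (∀ k, k < pvB_bisect starts x 0 starts.length → starts.getD k 0 < x) ∧
      (∀ k, pvB_bisect starts x 0 starts.length ≤ k → k < starts.length →
        x ≤ starts.getD k 0) :=
  pvB_bisectGo_inv starts x hm (starts.length - 0) 0 starts.length (by omega) (by omega)
    le_rfl (by omega) (by omega)

theorem pv_starts_getD (ys : List (List Int)) (k : Nat) (hk : k < ys.length) :
    (ys.map pvKey).getD k 0 = PySem.List.pyGetD (PySem.List.pyGetD ys (k : Int) []) 0 0 := by
  simp [pvKey, List.getD_eq_getElem?_getD, hk]

theorem pvA_innerGo_eq (ys : List (List Int)) (cur : Nat)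
    (hm : (ys.map pvKey).Pairwise (· ≤ ·)) :
    ∀ fuel nxt acc, ys.length - nxt ≤ fuel →
    pvA_innerGo ys cur fuel nxt acc = acc ++
      (List.range' nxt
          (pvB_bisect (ys.map pvKey)
            (PySem.List.pyGetD (PySem.List.pyGetD ys (cur : Int) []) 1 0) 0 ys.length - nxt)).map
        (fun (j : Nat) => [PySem.List.pyGetD ys (cur : Int) [], PySem.List.pyGetD ys (j : Int) []]) := by
  obtain ⟨hc1, hc2, hc3⟩ := pvB_bisect_spec (ys.map pvKey)
    (PySem.List.pyGetD (PySem.List.pyGetD ys (cur : Int) []) 1 0) hm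
  rw [List.length_map] at hc1 hc2 hc3
  set c := pvB_bisect (ys.map pvKey)
    (PySem.List.pyGetD (PySem.List.pyGetD ys (cur : Int) []) 1 0) 0 ys.length with hcdef
  intro fuel
  induction fuel with
  | zero =>
    intro nxt acc hfuel
    have : c - nxt = 0 := by omega
    simp [pvA_innerGo, this]
  | succ fuel ih =>
    intro nxt acc hfuel
    by_cases h : nxt < ys.length ∧
        PySem.List.pyGetD (PySem.List.pyGetD ys (nxt : Int) []) 0 0 <
          PySem.List.pyGetD (PySem.List.pyGetD ys (cur : Int) []) 1 0
    · have hnc : nxt < c := by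
        by_contra hcon
        push Not at hcon
        have := hc3 nxt hcon h.1
        rw [pv_starts_getD ys nxt h.1] at this
        omega
      rw [pvA_innerGo, if_pos h, ih (nxt + 1) _ (by omega)]
      have hsplit : c - nxt = (c - (nxt + 1)) + 1 := by omega
      rw [hsplit, List.range'_succ, List.map_cons]
      simp
    · rw [pvA_innerGo, if_neg h]
      have hcn : c ≤ nxt := by
        by_cases hlen : nxt < ys.length
        · by_contra hcon
          push Not at hcon
          have := hc2 nxt hcon
          rw [pv_starts_getD ys nxt hlen] at this
          exact h ⟨hlen, this⟩
        · omega
      have : c - nxt = 0 := by omega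
      simp [this]

theorem pvA_outerGo_eq (ys : List (List Int))
    (hm : (ys.map pvKey).Pairwise (· ≤ ·)) :
    ∀ fuel cur acc, ys.length - cur ≤ fuel →
    pvA_outerGo ys fuel cur acc =
      acc ++ ((List.range' cur (ys.length - 1 - cur)).map (pvG ys)).flatten := by
  intro fuel
  induction fuel with
  | zero =>
    intro cur acc hfuel
    have : ys.length - 1 - cur = 0 := by omega
    simp [pvA_outerGo, this]
  | succ fuel ih =>
    intro cur acc hfuel
    by_cases h : cur + 1 < ys.length
    · rw [pvA_outerGo, if_pos h, pvA_inner,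
        pvA_innerGo_eq ys cur hm (ys.length - (cur + 1)) (cur + 1) acc (by omega),
        ih (cur + 1) _ (by omega)]
      have hsplit : ys.length - 1 - cur = (ys.length - 1 - (cur + 1)) + 1 := by omega
      rw [hsplit, List.range'_succ, List.map_cons, List.flatten_cons]
      simp [pvG]
    · rw [pvA_outerGo, if_neg h]
      have : ys.length - 1 - cur = 0 := by omega
      simp [this]

theorem pvG_last (ys : List (List Int)) (hm : (ys.map pvKey).Pairwise (· ≤ ·))
    (m : Nat) (h : m + 1 = ys.length) : pvG ys m = [] := by
  obtain ⟨hc1, -, -⟩ := pvB_bisect_spec (ys.map pvKey)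
    (PySem.List.pyGetD (PySem.List.pyGetD ys (m : Int) []) 1 0) hm
  rw [List.length_map] at hc1
  have : pvB_bisect (ys.map pvKey)
      (PySem.List.pyGetD (PySem.List.pyGetD ys (m : Int) []) 1 0) 0 ys.length - (m + 1) = 0 := by
    omega
  simp only [pvG, this, List.range'_zero, List.map_nil]

theorem pv_solution_eq (appointments : List (List Int)) :
    solution appointments = solution_alt appointments := by
  have hm : ((PySem.List.sorted appointments pvKey false).map pvKey).Pairwise (· ≤ ·) :=
    PySem.List.sorted_map_key_pairwise ..
  simp only [solution, solution_alt]
  rw [pvA_outerGo_eq _ hm (PySem.List.sorted appointments pvKey false).length 0 [] (by omega),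
    PySem.List.foldl_append_eq_flatMap, List.range_eq_range']
  show _ = [] ++ (List.range' 0 (PySem.List.sorted appointments pvKey false).length).flatMap
    (pvG (PySem.List.sorted appointments pvKey false))
  set ys := PySem.List.sorted appointments pvKey false with hys
  rcases Nat.eq_zero_or_pos ys.length with h0 | hpos
  · simp [h0]
  · have hsucc : ys.length = (ys.length - 1) + 1 := by omega
    rw [hsucc, List.range'_1_concat, List.flatMap_append]
    simp [pvG_last ys hm (ys.length - 1) (by omega), List.flatMap_def]

-- ===== VERDICT (by name: the statement is the Claim_ definition above) =====
theorem solution_spec : Claim_equal_solution := by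
  intro appointments _ _
  exact pv_solution_eq appointments
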